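-- pv_equiv track=rewrite | github.com/gthieleb/pycherwell | pycherwell/app_client.py | _get_csv_columns
-- ===== SOURCE A (Python) =====
-- def _get_csv_columns(header, entry):
--     """Returns list of column headers.
--
--     Args:
--         header: List of business objects.
--         entry: List of business objects.
--
--     Returns:
--         Returns a CSV row.
--
--     """
--
--     ref_entry = {}
--     for f in entry:
--         if 'field_id' not in f:
--             continue
--         ref_entry[f['field_id']] = f
--
--     row = []
--     for f in header:
--         if 'field_id' not in f:
--             continue
--         if f['field_id'] not in ref_entry:
--             row.append('')
--             continue
--         if 'value' not in ref_entry[f['field_id']]: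
--             row.append('')
--             continue
--         row.append(ref_entry[f['field_id']]['value'])
--     return row
-- ===== SOURCE B (Python) =====
-- def _get_csv_columns(header, entry):
--     """Returns list of column headers (CSV row) by scanning entry per header field."""
--     def cell(fid):
--         for e in reversed(entry):
--             if e.get('field_id') == fid:
--                 return e.get('value', '')
--         return ''
--     return [cell(f['field_id']) for f in header if 'field_id' in f]
-- ===== Notes on version B (the rewrite author's own statement) =====
-- stated objective: alternative
-- what changed: Dropped the ref_entry dict build: B answers each header field by a direct backwards scan of entry for the last element with that field_id (mirroring dict overwrite), expressed as a comprehension.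
import Mathlib
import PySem

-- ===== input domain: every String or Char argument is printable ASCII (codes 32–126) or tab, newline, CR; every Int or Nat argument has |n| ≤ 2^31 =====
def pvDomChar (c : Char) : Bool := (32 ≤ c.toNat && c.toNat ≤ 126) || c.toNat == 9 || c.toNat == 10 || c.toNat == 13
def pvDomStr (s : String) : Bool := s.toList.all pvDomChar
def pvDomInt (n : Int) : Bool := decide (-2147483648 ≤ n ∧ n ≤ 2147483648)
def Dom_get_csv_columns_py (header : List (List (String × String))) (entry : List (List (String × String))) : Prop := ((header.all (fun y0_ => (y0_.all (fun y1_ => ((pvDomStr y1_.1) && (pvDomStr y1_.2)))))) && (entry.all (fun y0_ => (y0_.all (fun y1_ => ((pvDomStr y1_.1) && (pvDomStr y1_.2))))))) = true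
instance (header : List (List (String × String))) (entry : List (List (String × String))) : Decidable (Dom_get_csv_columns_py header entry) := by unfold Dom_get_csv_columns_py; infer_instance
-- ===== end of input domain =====

-- B drops A's ref_entry dict build and instead answers each header field by a direct
-- backwards scan of entry for the last matching field_id (alternative decomposition, not faster).


-- ===== PORT A =====
-- ref_entry build: last entry with a given field_id wins (dict overwrite)
def pvRefEntry (entry : List (List (String × String))) :
    PySem.Dict String (List (String × String)) :=
  entry.foldl (fun d f =>
    match (PySem.Dict.mk f).get? "field_id" with
    | none => d
    | some fid => d.insert fid f) PySem.Dict.empty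

def get_csv_columns_py (header : List (List (String × String))) (entry : List (List (String × String))) : List String :=
  let ref := pvRefEntry entry
  header.foldl (fun row f =>
    match (PySem.Dict.mk f).get? "field_id" with
    | none => row
    | some fid =>
      match ref.get? fid with
      | none => row ++ [""]
      | some e =>
        match (PySem.Dict.mk e).get? "value" with
        | none => row ++ [""]
        | some v => row ++ [v]) []

-- ===== PORT B =====
-- cell(fid): scan reversed(entry) for the first element whose field_id equals fid
def pvCell (fid : String) : List (List (String × String)) → String
  | [] => ""
  | e :: rest =>
    if (PySem.Dict.mk e).get? "field_id" == some fid then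
      (PySem.Dict.mk e).getD "value" ""
    else pvCell fid rest

def get_csv_columns_py_alt (header : List (List (String × String))) (entry : List (List (String × String))) : List String :=
  (header.filterMap (fun f => (PySem.Dict.mk f).get? "field_id")).map
    (fun fid => pvCell fid entry.reverse)

-- ===== PRECONDITION & SPEC =====
def Spec_get_csv_columns_py (header : List (List (String × String))) (entry : List (List (String × String))) (out : List String) : Prop := out = get_csv_columns_py_alt header entry
instance (header : List (List (String × String))) (entry : List (List (String × String))) (out : List String) : Decidable (Spec_get_csv_columns_py header entry out) := by unfold Spec_get_csv_columns_py; infer_instance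

-- ===== CLAIM (what is proved, stated in full; the proofs are below) =====
def Claim_equal_get_csv_columns_py : Prop := ∀ (header : List (List (String × String))) (entry : List (List (String × String))), Dom_get_csv_columns_py header entry → Spec_get_csv_columns_py header entry (get_csv_columns_py header entry)

-- ===== LEMMAS AND PROOFS =====

-- first element of l whose field_id is fid (option form of pvCell's scan)
def pvFind (fid : String) : List (List (String × String)) → Option (List (String × String))
  | [] => none
  | e :: rest =>
    if (PySem.Dict.mk e).get? "field_id" == some fid then some e else pvFind fid rest

theorem pvCell_eq_find (fid : String) (l : List (List (String × String))) :
    pvCell fid l = match pvFind fid l with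
      | none => ""
      | some e => (PySem.Dict.mk e).getD "value" "" := by
  induction l with
  | nil => rfl
  | cons e rest ih =>
    simp only [pvCell, pvFind]
    split_ifs with h <;> simp [ih]

theorem pvFind_append (fid : String) (l1 l2 : List (List (String × String))) :
    pvFind fid (l1 ++ l2) = (pvFind fid l1).or (pvFind fid l2) := by
  induction l1 with
  | nil => rfl
  | cons e rest ih =>
    simp only [List.cons_append, pvFind]
    split_ifs with h <;> simp [ih]

theorem pvRef_get (entry : List (List (String × String)))
    (d : PySem.Dict String (List (String × String))) (fid : String) :
    (entry.foldl (fun d f =>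
      match (PySem.Dict.mk f).get? "field_id" with
      | none => d
      | some k => d.insert k f) d).get? fid =
    match pvFind fid entry.reverse with
    | none => d.get? fid
    | some e => some e := by
  induction entry generalizing d with
  | nil => rfl
  | cons e rest ih =>
    simp only [List.foldl_cons, List.reverse_cons, pvFind_append, ih]
    cases hrest : pvFind fid rest.reverse with
    | some x => simp [Option.or]
    | none =>
      simp only [Option.or]
      cases hf : (PySem.Dict.mk e).get? "field_id" with
      | none => simp [pvFind, hf]
      | some k =>
        simp only [pvFind, hf]
        by_cases hk : k = fid
        · subst hk; simp [PySem.Dict.get?_insert_self]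
        · have : (some k == some fid) = false := by
            simp [hk]
          simp [this, PySem.Dict.get?_insert_of_ne (d := d) (v := e) (Ne.symm hk)]

theorem pvRefEntry_get (entry : List (List (String × String))) (fid : String) :
    (pvRefEntry entry).get? fid = pvFind fid entry.reverse := by
  unfold pvRefEntry
  rw [pvRef_get]
  cases pvFind fid entry.reverse <;> simp [PySem.Dict.get?_empty]

theorem row_loop (entry : List (List (String × String)))
    (header : List (List (String × String))) (acc : List String) :
    header.foldl (fun row f =>
      match (PySem.Dict.mk f).get? "field_id" with
      | none => row
      | some fid =>
        match (pvRefEntry entry).get? fid with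
        | none => row ++ [""]
        | some e =>
          match (PySem.Dict.mk e).get? "value" with
          | none => row ++ [""]
          | some v => row ++ [v]) acc =
    acc ++ (header.filterMap (fun f => (PySem.Dict.mk f).get? "field_id")).map
      (fun fid => pvCell fid entry.reverse) := by
  induction header generalizing acc with
  | nil => simp
  | cons f rest ih =>
    simp only [List.foldl_cons, List.filterMap_cons]
    cases hf : (PySem.Dict.mk f).get? "field_id" with
    | none => simpa using ih acc
    | some fid =>
      dsimp only
      rw [pvRefEntry_get]
      cases hfind : pvFind fid entry.reverse with
      | none => simp [ih, pvCell_eq_find, hfind]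
      | some e =>
        cases hv : (PySem.Dict.mk e).get? "value" with
        | none => simp [ih, pvCell_eq_find, hfind, PySem.Dict.getD_eq_get?_getD, hv]
        | some v => simp [ih, pvCell_eq_find, hfind, PySem.Dict.getD_eq_get?_getD, hv]

-- ===== VERDICT (by name: the statement is the Claim_ definition above) =====
theorem get_csv_columns_py_spec : Claim_equal_get_csv_columns_py := by
  intro header entry _
  unfold Spec_get_csv_columns_py get_csv_columns_py get_csv_columns_py_alt
  simpa using row_loop entry header []
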